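-- pv_equiv track=rewrite | github.com/madein1983/The-Python-Workbook | 05_LISTS/p123_pigs_latina_punctuation_and_capit_marks_moved.py | move_punctuation_marks
-- ===== SOURCE A (Python) =====
-- def move_punctuation_marks(new_word) :
--     moved_punctuation = ""
--     cut = ""
--     for i in range(0,len(new_word)):
--         if (33 <= ord(new_word[i]) and ord(new_word[i]) <= 47) or (58 <= ord(new_word[i]) and ord(new_word[i]) <= 64) or ( 91 <= ord(new_word[i]) \
--             and ord(new_word[i]) <= 96 ) or (123 < ord(new_word[i])) :
--             cut = cut + new_word[i]
--         else :
--             moved_punctuation = moved_punctuation + new_word[i]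
--     moved_punctuation = moved_punctuation + cut
--     new_word = moved_punctuation
--     return new_word
-- ===== SOURCE B (Python) =====
-- def move_punctuation_marks(new_word):
--     def is_punct(c):
--         o = ord(c)
--         return 33 <= o <= 47 or 58 <= o <= 64 or 91 <= o <= 96 or o > 123
--     return ''.join(sorted(new_word, key=is_punct))
-- ===== Notes on version B (the rewrite author's own statement) =====
-- stated objective: idiomatic
-- what changed: Replaces the explicit index loop with two string accumulators by a single stable sort on a boolean is-punctuation key (non-punctuation sorts first, original order preserved within each class), joined once.
import Mathlib
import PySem

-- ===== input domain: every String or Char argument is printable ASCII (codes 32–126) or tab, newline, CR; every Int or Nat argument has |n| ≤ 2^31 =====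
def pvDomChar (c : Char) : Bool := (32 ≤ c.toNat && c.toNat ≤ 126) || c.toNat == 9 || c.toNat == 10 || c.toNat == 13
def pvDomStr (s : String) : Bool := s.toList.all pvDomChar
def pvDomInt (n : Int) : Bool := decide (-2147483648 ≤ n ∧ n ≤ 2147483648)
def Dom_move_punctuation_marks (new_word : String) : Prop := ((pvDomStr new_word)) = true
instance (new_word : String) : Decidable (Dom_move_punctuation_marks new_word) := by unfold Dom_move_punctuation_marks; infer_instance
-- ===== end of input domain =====

-- B moves the punctuation characters of a word to its end with one stable sort on a
-- boolean is-punctuation key instead of A's index loop with two string accumulators.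

-- ===== PORT A =====
-- transliteration of A: loop i in range(0, len(new_word)), indexing new_word[i],
-- appending the char to 'cut' if its code is in the punctuation ranges, else to
-- 'moved_punctuation'; finally return moved_punctuation + cut.
def move_punctuation_marks (new_word : String) : String :=
  let r :=
    (PySem.List.pyRange 0 (PySem.Str.len new_word)).foldl
      (fun (acc : List Char × List Char) i =>
        let ch := PySem.List.pyGetD new_word.toList i ' '
        if (33 ≤ ch.toNat ∧ ch.toNat ≤ 47) ∨ (58 ≤ ch.toNat ∧ ch.toNat ≤ 64) ∨
           (91 ≤ ch.toNat ∧ ch.toNat ≤ 96) ∨ (123 < ch.toNat) then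
          (acc.1, acc.2 ++ [ch])
        else
          (acc.1 ++ [ch], acc.2))
      ([], [])
  String.mk (r.1 ++ r.2)

-- ===== PORT B =====
-- helper is_punct of Source B (Python bool keys compare as 0/1, so the key is ported as Nat 0/1)
def pvIsPunct (c : Char) : Bool :=
  (33 ≤ c.toNat && c.toNat ≤ 47) || (58 ≤ c.toNat && c.toNat ≤ 64) ||
  (91 ≤ c.toNat && c.toNat ≤ 96) || (123 < c.toNat)

-- transliteration of Source B: ''.join(sorted(new_word, key=is_punct))
def move_punctuation_marks_alt (new_word : String) : String :=
  String.mk (PySem.List.sorted new_word.toList (fun c => if pvIsPunct c then (1 : Nat) else 0))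

-- ===== PRECONDITION & SPEC =====
def Spec_move_punctuation_marks (new_word : String) (out : String) : Prop := out = move_punctuation_marks_alt new_word
instance (new_word : String) (out : String) : Decidable (Spec_move_punctuation_marks new_word out) := by unfold Spec_move_punctuation_marks; infer_instance

-- ===== CLAIM (what is proved, stated in full; the proofs are below) =====
def Claim_equal_move_punctuation_marks : Prop := ∀ (new_word : String), Dom_move_punctuation_marks new_word → Spec_move_punctuation_marks new_word (move_punctuation_marks new_word)

-- ===== LEMMAS AND PROOFS =====

-- the boolean key used by B's stable sort
def pvKey (c : Char) : Nat := if pvIsPunct c then 1 else 0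

-- A's Prop-valued branch condition is exactly pvIsPunct
theorem pvCond_iff (ch : Char) :
    ((33 ≤ ch.toNat ∧ ch.toNat ≤ 47) ∨ (58 ≤ ch.toNat ∧ ch.toNat ≤ 64) ∨
     (91 ≤ ch.toNat ∧ ch.toNat ≤ 96) ∨ (123 < ch.toNat)) ↔ pvIsPunct ch = true := by
  simp only [pvIsPunct, Bool.or_eq_true, Bool.and_eq_true, decide_eq_true_eq]
  omega

-- inserting a punctuation char goes to the very end (its key 1 is never < any key)
theorem pvInsert_punct (x : Char) (hx : pvIsPunct x = true) (l : List Char) :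
    PySem.List.insertBy (fun a b => decide (pvKey a < pvKey b)) x l = l ++ [x] := by
  apply PySem.List.insertBy_of_forall_not_before
  intro y _
  simp only [pvKey, hx, if_true, decide_eq_false_iff_not]
  split <;> omega

-- inserting a non-punctuation char into (non-punct ++ punct) lands at the boundary
theorem pvInsert_nonpunct (x : Char) (hx : pvIsPunct x = false) (p q : List Char)
    (hp : ∀ c ∈ p, pvIsPunct c = false) (hq : ∀ c ∈ q, pvIsPunct c = true) :
    PySem.List.insertBy (fun a b => decide (pvKey a < pvKey b)) x (p ++ q) = (p ++ [x]) ++ q := by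
  induction p with
  | nil =>
    cases q with
    | nil => rfl
    | cons c q' =>
      have hc := hq c (by simp)
      simp [PySem.List.insertBy, pvKey, hx, hc]
  | cons a p' ih =>
    have ha := hp a (by simp)
    have : decide (pvKey x < pvKey a) = false := by
      simp [pvKey, hx, ha]
    simp only [List.cons_append, PySem.List.insertBy, this, if_neg Bool.false_ne_true]
    rw [ih (fun c hc => hp c (by simp [hc]))]

-- invariant of B's insertion-sort fold: starting from a partitioned accumulator
theorem pvFoldB (xs : List Char) (p q : List Char)
    (hp : ∀ c ∈ p, pvIsPunct c = false) (hq : ∀ c ∈ q, pvIsPunct c = true) :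
    xs.foldl (fun acc x => PySem.List.insertBy (fun a b => decide (pvKey a < pvKey b)) x acc) (p ++ q)
      = (p ++ xs.filter (fun c => !pvIsPunct c)) ++ (q ++ xs.filter pvIsPunct) := by
  induction xs generalizing p q with
  | nil => simp
  | cons x xs ih =>
    by_cases h : pvIsPunct x = true
    · have : PySem.List.insertBy (fun a b => decide (pvKey a < pvKey b)) x (p ++ q)
          = p ++ (q ++ [x]) := by
        rw [pvInsert_punct x h (p ++ q)]; simp
      simp only [List.foldl_cons, this]
      rw [ih p (q ++ [x]) hp (by intro c hc; rcases List.mem_append.1 hc with h' | h'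
                                 · exact hq c h'
                                 · simp at h'; simpa [h'] using h)]
      simp [h]
    · have hx : pvIsPunct x = false := by simpa using h
      simp only [List.foldl_cons, pvInsert_nonpunct x hx p q hp hq]
      rw [ih (p ++ [x]) q (by intro c hc; rcases List.mem_append.1 hc with h' | h'
                              · exact hp c h'
                              · simp at h'; simpa [h'] using hx) hq]
      simp [hx]

-- B's port computes the stable partition
theorem pvB_eq (s : String) :
    move_punctuation_marks_alt s
      = String.mk (s.toList.filter (fun c => !pvIsPunct c) ++ s.toList.filter pvIsPunct) := by
  unfold move_punctuation_marks_alt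
  rw [PySem.List.sorted_eq_foldl_insertBy]
  exact congrArg String.mk (by simpa [pvKey] using pvFoldB s.toList [] [] (by simp) (by simp))

-- invariant of A's accumulator fold
theorem pvFoldA (xs : List Char) (m c : List Char) :
    xs.foldl
      (fun (acc : List Char × List Char) ch =>
        if (33 ≤ ch.toNat ∧ ch.toNat ≤ 47) ∨ (58 ≤ ch.toNat ∧ ch.toNat ≤ 64) ∨
           (91 ≤ ch.toNat ∧ ch.toNat ≤ 96) ∨ (123 < ch.toNat) then
          (acc.1, acc.2 ++ [ch])
        else
          (acc.1 ++ [ch], acc.2)) (m, c)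
      = (m ++ xs.filter (fun ch => !pvIsPunct ch), c ++ xs.filter pvIsPunct) := by
  induction xs generalizing m c with
  | nil => simp
  | cons x xs ih =>
    by_cases h : pvIsPunct x = true
    · rw [List.foldl_cons, if_pos ((pvCond_iff x).2 h), ih]
      simp [h]
    · have hx : pvIsPunct x = false := by simpa using h
      rw [List.foldl_cons, if_neg (fun hc => h ((pvCond_iff x).1 hc)), ih]
      simp [hx]

-- ===== VERDICT (by name: the statement is the Claim_ definition above) =====
theorem move_punctuation_marks_spec : Claim_equal_move_punctuation_marks := by
  intro new_word _
  show move_punctuation_marks new_word = move_punctuation_marks_alt new_word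
  unfold move_punctuation_marks
  rw [pvB_eq]
  have hbridge := PySem.List.foldl_pyRange_zero_pyGetD' new_word.toList ' '
    (fun (acc : List Char × List Char) ch =>
      if (33 ≤ ch.toNat ∧ ch.toNat ≤ 47) ∨ (58 ≤ ch.toNat ∧ ch.toNat ≤ 64) ∨
         (91 ≤ ch.toNat ∧ ch.toNat ≤ 96) ∨ (123 < ch.toNat) then
        (acc.1, acc.2 ++ [ch])
      else
        (acc.1 ++ [ch], acc.2)) ([], [])
  simp only [PySem.Str.len]
  rw [hbridge, pvFoldA]
  simp
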